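-- pv_equiv track=rewrite | github.com/DanielCoyote/Nonogramas-de-Colores | NonogramaCaballo.py | extraer_secuencias
-- ===== SOURCE A (Python) =====
-- def extraer_secuencias(linea):
--
--     secuencias = []
--     cuenta = 0
--     color_actual = None
--     inicio = None
--     for idx, celda in enumerate(linea):
--         if celda != 0:
--             if celda == color_actual:
--                 cuenta += 1
--             else:
--                 if cuenta > 0:
--                     secuencias.append((color_actual, cuenta, inicio, idx - 1))
--                 color_actual = celda
--                 cuenta = 1
--                 inicio = idx
--         else:
--             if cuenta > 0:
--                 secuencias.append((color_actual, cuenta, inicio, idx - 1))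
--                 cuenta = 0
--                 color_actual = None
--                 inicio = None
--     if cuenta > 0:
--         secuencias.append((color_actual, cuenta, inicio, len(linea) - 1))
--     return secuencias
-- ===== SOURCE B (Python) =====
-- def extraer_secuencias(linea):
--     # two-pointer run scan: find each maximal run of equal cells at once
--     res = []
--     i = 0
--     n = len(linea)
--     while i < n:
--         j = i + 1
--         while j < n and linea[j] == linea[i]:
--             j += 1
--         if linea[i] != 0:
--             res.append((linea[i], j - i, i, j - 1))
--         i = j
--     return res
-- ===== Notes on version B (the rewrite author's own statement) =====
-- stated objective: alternative
-- what changed: Replaced the color_actual/cuenta/inicio state machine with end-of-run flushes by a two-pointer scan that finds each maximal run of equal cells at once and emits nonzero runs directly.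
import Mathlib
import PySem

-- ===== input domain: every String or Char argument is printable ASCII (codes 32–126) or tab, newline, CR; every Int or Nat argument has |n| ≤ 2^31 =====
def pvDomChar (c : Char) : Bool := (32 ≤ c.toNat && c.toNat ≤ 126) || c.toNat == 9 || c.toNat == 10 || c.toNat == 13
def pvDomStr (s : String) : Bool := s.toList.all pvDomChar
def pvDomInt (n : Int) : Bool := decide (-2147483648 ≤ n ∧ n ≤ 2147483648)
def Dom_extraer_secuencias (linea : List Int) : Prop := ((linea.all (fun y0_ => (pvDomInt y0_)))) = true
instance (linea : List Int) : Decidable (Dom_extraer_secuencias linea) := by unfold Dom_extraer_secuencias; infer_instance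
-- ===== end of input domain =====

-- B replaces A's cell-by-cell state machine by a two-pointer scan emitting whole runs; alternative decomposition, same cost.

-- ===== PORT A =====
-- A's for-loop as structural recursion over the list, carrying (secuencias, cuenta, color_actual, inicio, idx).
def loopA (secs : List (Int × Int × Int × Int)) (cuenta : Int) (color : Option Int)
    (inicio : Option Int) (idx : Int) : List Int → List (Int × Int × Int × Int) × Int × Option Int × Option Int
  | [] => (secs, cuenta, color, inicio)
  | celda :: rest =>
    if celda ≠ 0 then
      if some celda = color then
        loopA secs (cuenta + 1) color inicio (idx + 1) rest
      else
        loopA (if cuenta > 0 then secs ++ [(color.getD 0, cuenta, inicio.getD 0, idx - 1)] else secs)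
          1 (some celda) (some idx) (idx + 1) rest
    else
      if cuenta > 0 then
        loopA (secs ++ [(color.getD 0, cuenta, inicio.getD 0, idx - 1)]) 0 none none (idx + 1) rest
      else
        loopA secs cuenta color inicio (idx + 1) rest

def extraer_secuencias (linea : List Int) : List (Int × Int × Int × Int) :=
  match loopA [] 0 none none 0 linea with
  | (secs, cuenta, color, inicio) =>
    if cuenta > 0 then secs ++ [(color.getD 0, cuenta, inicio.getD 0, (linea.length : Int) - 1)]
    else secs

-- ===== PORT B =====
-- B's outer while: each step consumes one whole maximal run (inner while = takeWhile/dropWhile).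
def groupRuns (pos : Int) : List Int → List (Int × Int × Int × Int)
  | [] => []
  | x :: xs =>
    let len : Int := ((xs.takeWhile (· == x)).length : Int) + 1
    (if x ≠ 0 then [(x, len, pos, pos + len - 1)] else []) ++
      groupRuns (pos + len) (xs.dropWhile (· == x))
termination_by l => l.length
decreasing_by exact Nat.lt_succ_of_le (List.length_dropWhile_le _ _)

def extraer_secuencias_alt (linea : List Int) : List (Int × Int × Int × Int) :=
  groupRuns 0 linea

-- ===== PRECONDITION & SPEC =====
def Spec_extraer_secuencias (linea : List Int) (out : List (Int × Int × Int × Int)) : Prop := out = extraer_secuencias_alt linea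
instance (linea : List Int) (out : List (Int × Int × Int × Int)) : Decidable (Spec_extraer_secuencias linea out) := by unfold Spec_extraer_secuencias; infer_instance

-- ===== CLAIM (what is proved, stated in full; the proofs are below) =====
def Claim_equal_extraer_secuencias : Prop := ∀ (linea : List Int), Dom_extraer_secuencias linea → Spec_extraer_secuencias linea (extraer_secuencias linea)

-- ===== LEMMAS AND PROOFS =====

-- final flush of A's loop state at end index e
def finishA (e : Int) : List (Int × Int × Int × Int) × Int × Option Int × Option Int → List (Int × Int × Int × Int)
  | (secs, cuenta, color, inicio) =>
    if cuenta > 0 then secs ++ [(color.getD 0, cuenta, inicio.getD 0, e)] else secs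

-- unfolding lemmas for A's loop, one per branch
lemma loopA_same (secs : List (Int × Int × Int × Int)) (c : Int) (x : Int) (inicio : Option Int)
    (idx : Int) (rest : List Int) (h : x ≠ 0) :
    loopA secs c (some x) inicio idx (x :: rest) = loopA secs (c + 1) (some x) inicio (idx + 1) rest := by
  simp [loopA, h]

lemma loopA_new_pos (secs : List (Int × Int × Int × Int)) (c : Int) (color inicio : Option Int)
    (idx celda : Int) (rest : List Int) (h : celda ≠ 0) (h2 : some celda ≠ color) (hc : 0 < c) :
    loopA secs c color inicio idx (celda :: rest)
      = loopA (secs ++ [(color.getD 0, c, inicio.getD 0, idx - 1)]) 1 (some celda) (some idx) (idx + 1) rest := by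
  simp [loopA, h, h2, hc]

lemma loopA_new_zero (secs : List (Int × Int × Int × Int)) (color inicio : Option Int)
    (idx celda : Int) (rest : List Int) (h : celda ≠ 0) (h2 : some celda ≠ color) :
    loopA secs 0 color inicio idx (celda :: rest)
      = loopA secs 1 (some celda) (some idx) (idx + 1) rest := by
  simp [loopA, h, h2]

lemma loopA_z_pos (secs : List (Int × Int × Int × Int)) (c : Int) (color inicio : Option Int)
    (idx : Int) (rest : List Int) (hc : 0 < c) :
    loopA secs c color inicio idx ((0 : Int) :: rest)
      = loopA (secs ++ [(color.getD 0, c, inicio.getD 0, idx - 1)]) 0 none none (idx + 1) rest := by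
  simp [loopA, hc]

lemma loopA_z_zero (secs : List (Int × Int × Int × Int)) (color inicio : Option Int)
    (idx : Int) (rest : List Int) :
    loopA secs 0 color inicio idx ((0 : Int) :: rest) = loopA secs 0 color inicio (idx + 1) rest := by
  simp [loopA]

-- a leading zero only shifts the position counter
lemma groupRuns_zero_cons (p : Int) (xs : List Int) :
    groupRuns p (0 :: xs) = groupRuns (p + 1) xs := by
  cases xs with
  | nil => simp [groupRuns]
  | cons y ys =>
    by_cases hy : y = 0
    · subst hy
      simp only [groupRuns, List.takeWhile, List.dropWhile]
      norm_num
      ring_nf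
    · have hb : (y == (0 : Int)) = false := by simpa using hy
      simp only [groupRuns, List.takeWhile, List.dropWhile, hb]
      norm_num

lemma main_invariant : ∀ (n : Nat) (l : List Int), l.length ≤ n →
    (∀ (p : Int) (acc : List (Int × Int × Int × Int)),
      finishA (p + l.length - 1) (loopA acc 0 none none p l) = acc ++ groupRuns p l) ∧
    (∀ (p : Int) (acc : List (Int × Int × Int × Int)) (c x i0 : Int), x ≠ 0 → 0 < c →
      finishA (p + l.length - 1) (loopA acc c (some x) (some i0) p l)
        = acc ++ (x, c + ((l.takeWhile (· == x)).length : Int), i0,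
                   p + ((l.takeWhile (· == x)).length : Int) - 1)
              :: groupRuns (p + ((l.takeWhile (· == x)).length : Int)) (l.dropWhile (· == x))) := by
  intro n
  induction n with
  | zero =>
    intro l hl
    have hl0 : l = [] := List.length_eq_zero_iff.mp (Nat.le_zero.mp hl)
    subst hl0
    refine ⟨fun p acc => by simp [loopA, finishA, groupRuns], fun p acc c x i0 hx hc => ?_⟩
    simp [loopA, finishA, groupRuns, hc]
  | succ m ih =>
    intro l hl
    cases l with
    | nil =>
      refine ⟨fun p acc => by simp [loopA, finishA, groupRuns], fun p acc c x i0 hx hc => ?_⟩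
      simp [loopA, finishA, groupRuns, hc]
    | cons y xs =>
      have hxs : xs.length ≤ m := Nat.lt_succ_iff.mp (by simpa using hl)
      obtain ⟨ihF, ihR⟩ := ih xs hxs
      have harith : ∀ p : Int, p + ((y :: xs : List Int).length : Int) - 1 = (p + 1) + (xs.length : Int) - 1 := by
        intro p; push_cast [List.length_cons]; ring
      constructor
      · -- fresh state
        intro p acc
        rw [harith]
        by_cases hy : y = 0
        · subst hy
          rw [loopA_z_zero, ihF (p + 1) acc, groupRuns_zero_cons]
        · rw [loopA_new_zero acc none none p y xs hy (by simp),
            ihR (p + 1) acc 1 y p hy (by norm_num)]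
          simp only [groupRuns, ne_eq, hy, not_false_eq_true, if_true, ite_true,
            List.cons_append, List.nil_append]
          push_cast [List.length_cons]
          ring_nf
      · -- mid-run state
        intro p acc c x i0 hx hc
        rw [harith]
        by_cases hyx : y = x
        · subst hyx
          rw [loopA_same acc c y i0 p xs hx, ihR (p + 1) acc (c + 1) y i0 hx (by omega)]
          have ht : (y :: xs).takeWhile (· == y) = y :: xs.takeWhile (· == y) := by
            simp [List.takeWhile]
          have hd : (y :: xs).dropWhile (· == y) = xs.dropWhile (· == y) := by
            simp [List.dropWhile]
          rw [ht, hd]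
          push_cast [List.length_cons]
          ring_nf
        · have hbx : (y == x) = false := by simpa using hyx
          have htk : (y :: xs).takeWhile (· == x) = [] := by
            simp [List.takeWhile, hbx]
          have hdr : (y :: xs).dropWhile (· == x) = y :: xs := by
            simp [List.dropWhile, hbx]
          rw [htk, hdr]
          by_cases hy : y = 0
          · subst hy
            rw [loopA_z_pos acc c (some x) (some i0) p xs hc,
              ihF (p + 1) (acc ++ [((some x).getD 0, c, (some i0).getD 0, p - 1)]),
              groupRuns_zero_cons]
            simp
          · rw [loopA_new_pos acc c (some x) (some i0) p y xs hy (by simpa using hyx) hc,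
              ihR (p + 1) (acc ++ [((some x).getD 0, c, (some i0).getD 0, p - 1)]) 1 y p hy (by norm_num)]
            simp only [groupRuns, ne_eq, hy, not_false_eq_true, if_true, ite_true,
              Option.getD_some, List.cons_append, List.nil_append, List.append_assoc,
              List.length_nil, Nat.cast_zero, add_zero]
            push_cast [List.length_cons]
            ring_nf

-- ===== VERDICT (by name: the statement is the Claim_ definition above) =====
theorem extraer_secuencias_spec : Claim_equal_extraer_secuencias := by
  intro linea _
  unfold Spec_extraer_secuencias extraer_secuencias extraer_secuencias_alt
  have h := (main_invariant linea.length linea le_rfl).1 0 []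
  have he : (0 : Int) + (linea.length : Int) - 1 = (linea.length : Int) - 1 := by ring
  rw [he] at h
  simp only [List.nil_append] at h
  rw [← h]
  rfl
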